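-- pv_equiv track=rewrite | github.com/Aasthaengg/IBMdataset | Python_codes/p02686/s793177420.py | check
-- ===== SOURCE A (Python) =====
-- def check(DR):
--     D = 0
--     for dr in DR[::-1]:
--         dmin, d = dr
--         if D + dmin < 0:
--             return False
--         D += d
--     return True
-- ===== SOURCE B (Python) =====
-- def check(DR):
--     s = 0
--     ps = []
--     for _, d in DR:
--         s += d
--         ps.append(s)
--     return all(dmin + s - p >= 0 for (dmin, _), p in zip(DR, ps))
-- ===== Notes on version B (the rewrite author's own statement) =====
-- stated objective: alternative
-- what changed: B builds the forward prefix sums of d in one pass and then checks all elements at once with all() over zip(DR, prefix_sums) (dmin + total - prefix >= 0), instead of A's reversed-list scan with an incremental accumulator and early return; the result is order-independent so values agree.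
import Mathlib
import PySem

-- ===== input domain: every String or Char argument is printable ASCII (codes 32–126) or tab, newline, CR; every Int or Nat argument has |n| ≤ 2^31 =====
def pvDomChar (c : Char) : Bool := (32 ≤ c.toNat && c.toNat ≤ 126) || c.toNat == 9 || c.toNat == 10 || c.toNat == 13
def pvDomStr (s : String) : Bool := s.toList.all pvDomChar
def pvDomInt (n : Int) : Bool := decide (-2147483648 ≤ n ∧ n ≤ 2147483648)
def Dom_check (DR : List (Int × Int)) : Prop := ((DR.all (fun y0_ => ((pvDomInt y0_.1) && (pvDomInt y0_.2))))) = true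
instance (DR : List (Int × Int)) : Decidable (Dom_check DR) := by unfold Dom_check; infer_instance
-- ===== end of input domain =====

-- B builds the forward prefix sums of d in one pass, then checks every element at once with
-- an 'all' over zip(DR, prefix sums), instead of A's reversed scan with an accumulator and
-- early return; same O(n) cost (objective: alternative).

-- ===== PORT A =====
-- the 'for dr in DR[::-1]' loop with accumulator D and early return False
def checkLoop : List (Int × Int) → Int → Bool
  | [], _ => true
  | (dmin, d) :: rest, D => if D + dmin < 0 then false else checkLoop rest (D + d)

def check (DR : List (Int × Int)) : Bool :=
  -- DR[::-1] = (PySem.List.slice? DR none none (-1)) = some DR.reverse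
  checkLoop ((PySem.List.slice? DR none none (-1)).getD []) 0

-- ===== PORT B =====
-- one forward loop producing (s, ps): s the running sum, ps the list of prefix sums;
-- then 'all(dmin + s - p >= 0 for (dmin, _), p in zip(DR, ps))'
def check_alt (DR : List (Int × Int)) : Bool :=
  let sp := DR.foldl (fun (acc : Int × List Int) p => (acc.1 + p.2, acc.2 ++ [acc.1 + p.2])) (0, [])
  (DR.zip sp.2).all (fun x => decide (x.1.1 + sp.1 - x.2 ≥ 0))

-- ===== PRECONDITION & SPEC =====
def Spec_check (DR : List (Int × Int)) (out : Bool) : Prop := out = check_alt DR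
instance (DR : List (Int × Int)) (out : Bool) : Decidable (Spec_check DR out) := by unfold Spec_check; infer_instance

-- ===== CLAIM (what is proved, stated in full; the proofs are below) =====
def Claim_equal_check : Prop := ∀ (DR : List (Int × Int)), Dom_check DR → Spec_check DR (check DR)

-- ===== LEMMAS AND PROOFS =====

def sumD (xs : List (Int × Int)) : Int := (xs.map Prod.snd).sum

-- the list of prefix sums of d starting from s
def scanFrom : List (Int × Int) → Int → List Int
  | [], _ => []
  | (_, d) :: rest, s => (s + d) :: scanFrom rest (s + d)

-- intermediate shape: a forward loop keeping the suffix sum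
def altLoop : List (Int × Int) → Int → Bool
  | [], _ => true
  | (dmin, d) :: rest, total =>
      let total' := total - d
      if dmin + total' < 0 then false else altLoop rest total'

theorem sumD_reverse (xs : List (Int × Int)) : sumD xs.reverse = sumD xs := by
  simp [sumD]

theorem foldl_pair_eq (xs : List (Int × Int)) (a : Int) (l : List Int) :
    xs.foldl (fun (acc : Int × List Int) p => (acc.1 + p.2, acc.2 ++ [acc.1 + p.2])) (a, l)
      = (a + sumD xs, l ++ scanFrom xs a) := by
  induction xs generalizing a l with
  | nil => simp [sumD, scanFrom]
  | cons p rest ih =>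
      obtain ⟨dmin, d⟩ := p
      simp [List.foldl_cons, ih, sumD, scanFrom, List.map_cons, add_assoc]

theorem checkLoop_append (xs ys : List (Int × Int)) (D : Int) :
    checkLoop (xs ++ ys) D =
      (if checkLoop xs D then checkLoop ys (D + sumD xs) else false) := by
  induction xs generalizing D with
  | nil => simp [checkLoop, sumD]
  | cons a rest ih =>
      obtain ⟨dmin, d⟩ := a
      by_cases h : D + dmin < 0 <;>
        simp [checkLoop, h, ih, sumD, List.map_cons, add_assoc]

theorem altLoop_eq_checkLoop (xs : List (Int × Int)) (t : Int) :
    altLoop xs t = checkLoop xs.reverse (t - sumD xs) := by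
  induction xs generalizing t with
  | nil => simp [altLoop, checkLoop]
  | cons a rest ih =>
      obtain ⟨dmin, d⟩ := a
      have hrev : ((dmin, d) :: rest).reverse = rest.reverse ++ [(dmin, d)] := by simp
      rw [hrev, checkLoop_append, sumD_reverse]
      have hsum : sumD ((dmin, d) :: rest) = d + sumD rest := by
        simp [sumD, List.map_cons]
      simp only [altLoop, ih, hsum]
      have e1 : t - (d + sumD rest) = t - d - sumD rest := by ring
      rw [e1]
      by_cases h : checkLoop rest.reverse (t - d - sumD rest)
      · have e2 : t - d - sumD rest + sumD rest = t - d := by ring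
        by_cases h2 : dmin + (t - d) < 0
        · have h2' : t - d + dmin < 0 := by omega
          simp [h, h2, checkLoop, e2, h2']
        · have h2' : ¬ t - d + dmin < 0 := by omega
          simp [h, h2, checkLoop, e2, h2']
      · by_cases h2 : dmin + (t - d) < 0 <;> simp [h, h2]

theorem zip_scan_all_eq_altLoop (xs : List (Int × Int)) (s t : Int) :
    (xs.zip (scanFrom xs s)).all (fun x => decide (x.1.1 + t - x.2 ≥ 0))
      = altLoop xs (t - s) := by
  induction xs generalizing s with
  | nil => simp [scanFrom, altLoop]
  | cons a rest ih =>
      obtain ⟨dmin, d⟩ := a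
      simp only [scanFrom, List.zip_cons_cons, List.all_cons, ih, altLoop]
      have e : t - s - d = t - (s + d) := by ring
      rw [e]
      by_cases h : dmin + (t - (s + d)) < 0
      · have h' : ¬ dmin + t - (s + d) ≥ 0 := by omega
        rw [if_pos h]
        simp only [Bool.and_eq_false_iff]
        left
        simpa using h'
      · have h' : dmin + t - (s + d) ≥ 0 := by omega
        rw [if_neg h]
        have hd : decide (dmin + t - (s + d) ≥ 0) = true := by simpa using h'
        rw [hd, Bool.true_and]

-- ===== VERDICT (by name: the statement is the Claim_ definition above) =====
theorem check_spec : Claim_equal_check := by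
  intro DR _
  unfold Spec_check check check_alt
  rw [PySem.List.slice?_none_none_neg_one]
  simp only [foldl_pair_eq, List.nil_append, Int.zero_add]
  rw [zip_scan_all_eq_altLoop, altLoop_eq_checkLoop]
  simp
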